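-- pv_equiv track=rewrite | github.com/timberhill/radiant | modules/helpers.py | insertSubfolder
-- ===== SOURCE A (Python) =====
-- def insertSubfolder(filename, subfolder):
-- 	if subfolder == '' or filename == '':
-- 		return filename
--
-- 	splitted = filename.split('/')
-- 	new = []
-- 	for i in range(0,len(splitted)):
-- 		if i == len(splitted)-1:
-- 			new.append(subfolder)
-- 		new.append(splitted[i])
--
-- 	return '/'.join(new)
-- ===== SOURCE B (Python) =====
-- def insertSubfolder(filename, subfolder):
-- 	if subfolder == '' or filename == '':
-- 		return filename
-- 	head, sep, tail = filename.rpartition('/')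
-- 	if sep:
-- 		return head + sep + subfolder + '/' + tail
-- 	return subfolder + '/' + tail
-- ===== Notes on version B (the rewrite author's own statement) =====
-- stated objective: idiomatic
-- what changed: Replaces split-on-every-slash plus an index-walking loop that rebuilds and rejoins all components with a single str.rpartition at the last '/' and direct concatenation.
import Mathlib
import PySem

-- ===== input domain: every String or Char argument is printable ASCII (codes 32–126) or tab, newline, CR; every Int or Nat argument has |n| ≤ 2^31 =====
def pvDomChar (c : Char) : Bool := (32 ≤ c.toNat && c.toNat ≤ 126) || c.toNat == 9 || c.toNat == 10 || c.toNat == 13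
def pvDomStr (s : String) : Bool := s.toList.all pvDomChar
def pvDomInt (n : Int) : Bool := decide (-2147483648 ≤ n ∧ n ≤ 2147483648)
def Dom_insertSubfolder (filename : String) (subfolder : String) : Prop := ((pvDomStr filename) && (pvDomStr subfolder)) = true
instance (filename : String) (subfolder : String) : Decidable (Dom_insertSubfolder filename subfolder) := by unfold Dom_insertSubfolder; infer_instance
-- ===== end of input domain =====

-- B replaces A's split-everything-and-rejoin index loop by one split at the last '/' (rpartition) and direct reassembly (idiomatic).

-- ===== PORT A =====
def insertSubfolder (filename : String) (subfolder : String) : String :=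
  if subfolder == "" || filename == "" then filename
  else
    let splitted : List String := (PySem.Chars.splitOn filename.toList ['/']).map String.ofList
    let new : List String :=
      (PySem.List.pyRange 0 (PySem.List.len splitted)).foldl
        (fun acc i =>
          (if i == PySem.List.len splitted - 1 then acc ++ [subfolder] else acc)
            ++ [PySem.List.pyGetD splitted i ""]) []
    PySem.Str.join "/" new

-- ===== PORT B =====
-- hand port of str.rpartition('/') (no PySem primitive): find the last '/';
-- none = no separator in the string, some (head, tail) = the parts before/after the last '/'
def rpartSlash : List Char → Option (List Char × List Char)
  | [] => none
  | c :: rest =>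
    match rpartSlash rest with
    | some (h, t) => some (c :: h, t)
    | none => if c = '/' then some ([], rest) else none

def insertSubfolder_alt (filename : String) (subfolder : String) : String :=
  if subfolder == "" || filename == "" then filename
  else
    match rpartSlash filename.toList with
    | some (h, t) => String.ofList (h ++ '/' :: (subfolder.toList ++ '/' :: t))
    | none => String.ofList (subfolder.toList ++ '/' :: filename.toList)

-- ===== PRECONDITION & SPEC =====
def Spec_insertSubfolder (filename : String) (subfolder : String) (out : String) : Prop := out = insertSubfolder_alt filename subfolder
instance (filename : String) (subfolder : String) (out : String) : Decidable (Spec_insertSubfolder filename subfolder out) := by unfold Spec_insertSubfolder; infer_instance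

-- ===== CLAIM (what is proved, stated in full; the proofs are below) =====
def Claim_equal_insertSubfolder : Prop := ∀ (filename : String) (subfolder : String), Dom_insertSubfolder filename subfolder → Spec_insertSubfolder filename subfolder (insertSubfolder filename subfolder)

-- ===== LEMMAS AND PROOFS =====

-- PySem's fuelled splitOn on the one-char separator '/' is Lean's List.splitOn
lemma splitOn_go_eq (fuel : Nat) : ∀ (l cur : List Char) (acc : List (List Char)), l.length < fuel →
    PySem.Chars.splitOn.go ['/'] fuel l cur acc
      = acc.reverse ++ (l.splitOn '/').modifyHead (cur.reverse ++ ·) := by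
  induction fuel with
  | zero => intro l cur acc h; omega
  | succ n ih =>
    intro l cur acc h
    cases l with
    | nil =>
      simp [PySem.Chars.splitOn.go]
    | cons c rest =>
      rw [PySem.Chars.splitOn.go]
      by_cases hc : c = '/'
      · subst hc
        have hp : ['/'].isPrefixOf ('/' :: rest) = true := by simp [List.isPrefixOf]
        rw [if_pos hp]
        rw [ih _ _ _ (by simpa using Nat.lt_of_succ_lt_succ h)]
        simp [List.splitOn, List.splitOnP_cons]
        cases List.splitOnP (fun x => x == '/') rest <;> simp
      · have hp : ['/'].isPrefixOf (c :: rest) = false := by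
          simp [List.isPrefixOf]
          exact fun h => hc h.symm
        rw [if_neg (by simp [hp])]
        rw [ih _ _ _ (by simpa using Nat.lt_of_succ_lt_succ h)]
        have : (c :: rest).splitOn '/' = (rest.splitOn '/').modifyHead (c :: ·) := by
          simp [List.splitOn, List.splitOnP_cons, hc]
        rw [this]
        rcases hsp : rest.splitOn '/' with _ | ⟨p, ps⟩
        · exact absurd hsp (by simp [List.splitOn]; exact List.splitOnP_ne_nil _ _)
        · simp

lemma chars_splitOn_eq (cs : List Char) : PySem.Chars.splitOn cs ['/'] = cs.splitOn '/' := by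
  rw [PySem.Chars.splitOn, splitOn_go_eq _ _ _ _ (by omega)]
  cases cs.splitOn '/' <;> simp

lemma splitOn_no_slash {t : List Char} (h : '/' ∉ t) : t.splitOn '/' = [t] := by
  induction t with
  | nil => simp [List.splitOn]
  | cons c rest ih =>
    simp only [List.mem_cons, not_or] at h
    have h2 := ih h.2
    simp only [List.splitOn] at h2 ⊢
    rw [List.splitOnP_cons, if_neg (by simp; exact fun hc => h.1 hc.symm), h2]
    simp

lemma rpartSlash_none : ∀ {cs : List Char}, rpartSlash cs = none → '/' ∉ cs := by
  intro cs
  induction cs with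
  | nil => simp
  | cons c rest ih =>
    intro h
    rw [rpartSlash] at h
    rcases hr : rpartSlash rest with _ | ⟨p, q⟩
    · rw [hr] at h
      simp only at h
      split_ifs at h with hc
      simp [ih hr]
      exact fun hh => hc hh.symm
    · rw [hr] at h; simp at h

lemma rpartSlash_some : ∀ {cs h t : List Char}, rpartSlash cs = some (h, t) →
    cs = h ++ '/' :: t ∧ '/' ∉ t := by
  intro cs
  induction cs with
  | nil => intro h t hs; simp [rpartSlash] at hs
  | cons c rest ih =>
    intro h t hs
    rw [rpartSlash] at hs
    rcases hr : rpartSlash rest with _ | ⟨p, q⟩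
    · rw [hr] at hs
      simp only at hs
      split_ifs at hs with hc
      · simp at hs
        obtain ⟨h1, h2⟩ := hs
        subst h1; subst h2; subst hc
        exact ⟨rfl, rpartSlash_none hr⟩
    · rw [hr] at hs
      simp at hs
      obtain ⟨h1, h2⟩ := hs
      obtain ⟨e1, e2⟩ := ih hr
      subst h2
      rw [← h1]
      exact ⟨by simp [e1], e2⟩

lemma splitOn_append_last {t : List Char} (h : List Char) (ht : '/' ∉ t) :
    (h ++ '/' :: t).splitOn '/' = h.splitOn '/' ++ [t] := by
  induction h with
  | nil => simp [List.splitOn, List.splitOnP_cons,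
      (show List.splitOnP (fun x => x == '/') t = [t] by
        have := splitOn_no_slash ht; simpa [List.splitOn] using this)]
  | cons c rest ih =>
    simp only [List.cons_append, List.splitOn, List.splitOnP_cons] at ih ⊢
    split_ifs with hc
    · rw [ih]; simp
    · rw [ih]
      rcases hsp : List.splitOnP (fun x => x == '/') rest with _ | ⟨p, ps⟩
      · exact absurd hsp (List.splitOnP_ne_nil _ _)
      · simp

lemma join_append_two (a b : List Char) : ∀ (xs : List (List Char)), xs ≠ [] →
    PySem.Chars.join ['/'] (xs ++ [a, b])
      = PySem.Chars.join ['/'] xs ++ '/' :: (a ++ '/' :: b) := by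
  intro xs
  induction xs with
  | nil => simp
  | cons x rest ih =>
    intro _
    cases rest with
    | nil =>
      simp [PySem.Chars.join_cons_cons, PySem.Chars.join_singleton]
    | cons y ys =>
      have hr := ih (by simp)
      rw [show (x :: y :: ys) ++ [a, b] = x :: y :: (ys ++ [a, b]) by simp,
        PySem.Chars.join_cons_cons, PySem.Chars.join_cons_cons,
        show y :: (ys ++ [a, b]) = (y :: ys) ++ [a, b] by simp, hr]
      simp

lemma join_splitOn (cs : List Char) : PySem.Chars.join ['/'] (cs.splitOn '/') = cs := by
  rw [PySem.Chars.join]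
  exact List.intercalate_splitOn cs '/'

-- A's index loop: the first k iterations copy the first k elements
lemma loop_take {α : Type} (xs : List α) (sub d : α) : ∀ (k : Nat), k < xs.length → ∀ acc,
    (PySem.List.pyRange 0 (k : Int)).foldl
      (fun acc i =>
        (if i == PySem.List.len xs - 1 then acc ++ [sub] else acc)
          ++ [PySem.List.pyGetD xs i d]) acc
      = acc ++ xs.take k := by
  intro k
  induction k with
  | zero => intro _ acc; simp [PySem.List.pyRange_one_eq_nil]
  | succ n ih =>
    intro hlt acc
    rw [show ((n + 1 : Nat) : Int) = (n : Int) + 1 by push_cast; ring,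
      PySem.List.pyRange_one_succ_right (by positivity), List.foldl_append]
    rw [ih (by omega)]
    have hne : ((n : Int) == PySem.List.len xs - 1) = false := by
      simp [PySem.List.len]
      omega
    simp only [List.foldl_cons, List.foldl_nil, hne]
    rw [PySem.List.pyGetD_natCast]
    rw [List.take_add_one]
    have : xs[n]? = some xs[n] := List.getElem?_eq_getElem (by omega)
    simp [this, List.getD, List.append_assoc]

-- A's index loop inserts sub before the last element
lemma loop_eq {α : Type} (xs : List α) (hne : xs ≠ []) (sub d : α) :
    (PySem.List.pyRange 0 (PySem.List.len xs)).foldl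
      (fun acc i =>
        (if i == PySem.List.len xs - 1 then acc ++ [sub] else acc)
          ++ [PySem.List.pyGetD xs i d]) []
      = xs.dropLast ++ [sub, xs.getLast hne] := by
  have hpos : 0 < xs.length := List.length_pos_of_ne_nil hne
  have hlen : PySem.List.len xs = ((xs.length - 1 : Nat) : Int) + 1 := by
    simp [PySem.List.len]; omega
  rw [show PySem.List.pyRange 0 (PySem.List.len xs)
      = PySem.List.pyRange 0 ((xs.length - 1 : Nat) : Int) ++ [((xs.length - 1 : Nat) : Int)] from by
        rw [hlen, PySem.List.pyRange_one_succ_right (by positivity)],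
    List.foldl_append]
  rw [loop_take xs sub d (xs.length - 1) (by omega)]
  have heq : (((xs.length - 1 : Nat) : Int) == PySem.List.len xs - 1) = true := by
    simp [PySem.List.len]; omega
  simp only [List.foldl_cons, List.foldl_nil, heq, if_true]
  rw [PySem.List.pyGetD_natCast]
  rw [List.dropLast_eq_take]
  have : xs.getD (xs.length - 1) d = xs.getLast hne := by
    rw [List.getLast_eq_getElem]
    simp [List.getD, List.getElem?_eq_getElem (show xs.length - 1 < xs.length by omega)]
  rw [this]
  simp

lemma toList_inj {s t : String} (h : s.toList = t.toList) : s = t := by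
  have := congrArg String.ofList h
  simpa [String.ofList_toList] using this

-- ===== VERDICT (by name: the statement is the Claim_ definition above) =====
theorem insertSubfolder_spec : Claim_equal_insertSubfolder := by
  unfold Claim_equal_insertSubfolder
  intro f sub _
  unfold Spec_insertSubfolder insertSubfolder insertSubfolder_alt
  by_cases hg : (sub == "" || f == "") = true
  · simp only [hg, if_true]
  · rw [Bool.not_eq_true] at hg
    simp only [hg, Bool.false_eq_true, if_false]
    have hf : f ≠ "" := by
      intro h; subst h; simp at hg
    have hcs : f.toList ≠ [] := by
      intro h
      exact hf (by have := congrArg String.ofList h; simpa [String.ofList_toList] using this)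
    set parts := f.toList.splitOn '/' with hparts
    have hpne : parts ≠ [] := List.splitOnP_ne_nil _ _
    have hsplitted : (PySem.Chars.splitOn f.toList ['/']).map String.ofList = parts.map String.ofList := by
      rw [chars_splitOn_eq]
    rw [hsplitted]
    have hmne : parts.map String.ofList ≠ [] := by simpa using hpne
    rw [loop_eq (parts.map String.ofList) hmne sub ""]
    apply toList_inj
    rw [PySem.Str.toList_join]
    have hmap : (((parts.map String.ofList).dropLast ++ [sub, (parts.map String.ofList).getLast hmne]).map String.toList)
        = parts.dropLast ++ [sub.toList, parts.getLast hpne] := by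
      rw [List.map_append, ← List.map_dropLast, List.getLast_map]
      simp [List.map_map, Function.comp_def]
    rw [hmap]
    rcases hrp : rpartSlash f.toList with _ | ⟨h, t⟩
    · have hns := rpartSlash_none hrp
      have : parts = [f.toList] := by rw [hparts, splitOn_no_slash hns]
      rw [show ("/" : String).toList = ['/'] from rfl]
      simp [this, PySem.Chars.join_cons_cons, PySem.Chars.join_singleton]
    · obtain ⟨he, hnt⟩ := rpartSlash_some hrp
      have hsp : parts = h.splitOn '/' ++ [t] := by
        rw [hparts, he, splitOn_append_last h hnt]
      have hdl : parts.dropLast = h.splitOn '/' := by rw [hsp, List.dropLast_concat]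
      have hgl : parts.getLast hpne = t := by
        have h1 : parts.getLast? = some t := by rw [hsp]; simp
        have h2 : parts.getLast? = some (parts.getLast hpne) := List.getLast?_eq_some_getLast _
        rw [h1] at h2
        exact (Option.some_injective _ h2).symm
      rw [hdl, hgl, show ("/" : String).toList = ['/'] from rfl]
      rw [join_append_two sub.toList t (h.splitOn '/') (List.splitOnP_ne_nil _ _)]
      rw [join_splitOn]
      simp
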